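-- pv_equiv track=rewrite | github.com/alexlm78/AoC | 2024/Day10/solve_day10.py | trailhead_score
-- ===== SOURCE A (Python) =====
-- from collections import deque
--
-- def neighbors(r: int, c: int, rows: int, cols: int):
--     """
--     Yield orthogonal neighbor coordinates within bounds.
--     Args:
--         r, c: Current row and column
--         rows, cols: Grid dimensions
--     Yields:
--         (nr, nc) neighbor positions
--     """
--     if r > 0:
--         yield r - 1, c
--     if r + 1 < rows:
--         yield r + 1, c
--     if c > 0:
--         yield r, c - 1
--     if c + 1 < cols:
--         yield r, c + 1
--
-- def trailhead_score(grid: list[list[int]], start_r: int, start_c: int) -> int: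
--     """
--     Compute the Part 1 score for a single trailhead.
--     A BFS follows only edges that increase height by exactly +1,
--     collecting all unique height-9 endpoints reachable.
--     Args:
--         grid: Height map
--         start_r, start_c: Trailhead coordinates (must be height 0)
--     Returns:
--         Count of distinct height-9 positions reachable
--     """
--     rows, cols = len(grid), len(grid[0])
--     q = deque()
--     q.append((start_r, start_c))
--     visited = set()
--     visited.add((start_r, start_c))
--     found9 = set()
--     while q:
--         r, c = q.popleft()
--         h = grid[r][c]
--         if h == 9:
--             # Stop exploring past 9; just record endpoint
--             found9.add((r, c))
--             continue
--         nh = h + 1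
--         for nr, nc in neighbors(r, c, rows, cols):
--             if (nr, nc) not in visited and grid[nr][nc] == nh:
--                 visited.add((nr, nc))
--                 q.append((nr, nc))
--     return len(found9)
-- ===== SOURCE B (Python) =====
-- def neighbors(r: int, c: int, rows: int, cols: int):
--     if r > 0:
--         yield r - 1, c
--     if r + 1 < rows:
--         yield r + 1, c
--     if c > 0:
--         yield r, c - 1
--     if c + 1 < cols:
--         yield r, c + 1
--
-- def trailhead_score(grid: list[list[int]], start_r: int, start_c: int) -> int:
--     # Level-set sweep: because every step climbs by exactly +1, the cells at
--     # distance d from the trailhead all have height h0+d, so we can propagate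
--     # one whole height level at a time and need no queue and no visited set.
--     rows, cols = len(grid), len(grid[0])
--     h = grid[start_r][start_c]
--     cur = {(start_r, start_c)}
--     while h < 9 and cur:
--         h += 1
--         nxt = set()
--         for r, c in cur:
--             for nr, nc in neighbors(r, c, rows, cols):
--                 if grid[nr][nc] == h:
--                     nxt.add((nr, nc))
--         cur = nxt
--     return len(cur) if h == 9 else 0
-- ===== Notes on version B (the rewrite author's own statement) =====
-- stated objective: alternative
-- what changed: Replaces the deque BFS with a visited set by a per-height level-set sweep: since every edge climbs by exactly +1, the cells reachable at distance d all have height h0+d, so B propagates one whole height level at a time (at most 9-h0 sweeps) and needs no queue and no visited set.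
-- outside the precondition, e.g. on trailhead_score([[1], [2, 3]], 0, 0): A returns 0, B returns 0; on trailhead_score([[5], [1, 2]], 0, 0): A returns 0, B returns 0
import Mathlib
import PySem

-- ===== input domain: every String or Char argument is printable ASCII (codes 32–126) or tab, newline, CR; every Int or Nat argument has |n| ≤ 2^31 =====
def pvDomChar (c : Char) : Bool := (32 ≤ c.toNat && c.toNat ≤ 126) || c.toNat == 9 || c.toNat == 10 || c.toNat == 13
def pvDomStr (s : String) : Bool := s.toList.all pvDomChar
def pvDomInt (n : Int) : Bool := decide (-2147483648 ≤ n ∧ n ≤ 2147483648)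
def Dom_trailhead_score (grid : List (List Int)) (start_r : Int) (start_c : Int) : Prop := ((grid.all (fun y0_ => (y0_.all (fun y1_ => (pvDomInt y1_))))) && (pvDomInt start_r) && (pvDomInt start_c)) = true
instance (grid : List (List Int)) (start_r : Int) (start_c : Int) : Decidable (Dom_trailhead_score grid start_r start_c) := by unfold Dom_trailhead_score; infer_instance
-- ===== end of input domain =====

-- B replaces A's queue+visited BFS by a per-height level-set sweep (heights climb by exactly +1,
-- so each BFS layer is one height level); equivalence of the RETURN value is proved on Pre_.

-- ===== PORT A =====
-- helper 'neighbors' (shared by both Pythons): the generator's yields, in order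
def pvNeighbors (r c rows cols : Int) : List (Int × Int) :=
  (if r > 0 then [(r - 1, c)] else []) ++
  (if r + 1 < rows then [(r + 1, c)] else []) ++
  (if c > 0 then [(r, c - 1)] else []) ++
  (if c + 1 < cols then [(r, c + 1)] else [])

-- grid[r][c]; exact wherever Python does not raise (Pre_ keeps all reads in range)
def pvAt (grid : List (List Int)) (r c : Int) : Int :=
  PySem.List.pyGetD (PySem.List.pyGetD grid r []) c 0

-- A's while-loop over the deque; fuel is port scaffolding (rows*cols+1 iterations always
-- suffice under Pre_, proved below); visited and found9 are PySem.Sets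
def pvBfs (grid : List (List Int)) (rows cols : Int) :
    Nat → List (Int × Int) → PySem.Set (Int × Int) → PySem.Set (Int × Int) → Int
  | 0, _, _, found9 => (found9.length : Int)
  | _ + 1, [], _, found9 => (found9.length : Int)
  | fuel + 1, rc :: q, visited, found9 =>
    let h := pvAt grid rc.1 rc.2
    if h = 9 then
      pvBfs grid rows cols fuel q visited (PySem.Set.add found9 rc)
    else
      let p := (pvNeighbors rc.1 rc.2 rows cols).foldl
        (fun (p : List (Int × Int) × PySem.Set (Int × Int)) y =>
          if y ∉ p.2 ∧ pvAt grid y.1 y.2 = h + 1 then (p.1 ++ [y], p.2 ++ [y]) else p)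
        (q, visited)
      pvBfs grid rows cols fuel p.1 p.2 found9

def trailhead_score (grid : List (List Int)) (start_r : Int) (start_c : Int) : Int :=
  let rows := PySem.List.len grid
  let cols := PySem.List.len (PySem.List.pyGetD grid 0 [])
  pvBfs grid rows cols
    ((grid.length + start_r.natAbs) * ((PySem.List.pyGetD grid 0 []).length + start_c.natAbs) + 1)
    [(start_r, start_c)] [(start_r, start_c)] []

-- ===== PORT B =====
-- one sweep of B's inner double loop: next level = in-bounds neighbours at height h, as a Set
def pvLevelStep (grid : List (List Int)) (rows cols h : Int) (cur : List (Int × Int)) :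
    PySem.Set (Int × Int) :=
  cur.foldl (fun nxt rc =>
    (pvNeighbors rc.1 rc.2 rows cols).foldl
      (fun nxt y => if pvAt grid y.1 y.2 = h then PySem.Set.add nxt y else nxt) nxt) []

-- B's while-loop: h increases each turn, so it terminates at 9 - h
def pvSweep (grid : List (List Int)) (rows cols : Int) (h : Int) (cur : List (Int × Int)) :
    List (Int × Int) × Int :=
  if h < 9 ∧ cur ≠ [] then
    pvSweep grid rows cols (h + 1) (pvLevelStep grid rows cols (h + 1) cur)
  else (cur, h)
termination_by (9 - h).toNat
decreasing_by omega

def trailhead_score_alt (grid : List (List Int)) (start_r : Int) (start_c : Int) : Int :=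
  let rows := PySem.List.len grid
  let cols := PySem.List.len (PySem.List.pyGetD grid 0 [])
  let h := pvAt grid start_r start_c
  let p := pvSweep grid rows cols h [(start_r, start_c)]
  if p.2 = 9 then (p.1.length : Int) else 0

-- ===== PRECONDITION & SPEC =====
-- Pre_ excludes empty and ragged grids and out-of-range starts, on which A raises IndexError
-- (rectangularity is slightly wider than the exact raising set: a ragged grid raises only when
-- the walk actually probes a short row; on the excluded-but-returning ragged corners A and B
-- still agree).  Negative in-range starts (Python wraparound) are admitted.
def Pre_trailhead_score (grid : List (List Int)) (start_r : Int) (start_c : Int) : Prop :=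
  grid ≠ [] ∧
  (∀ row ∈ grid, row.length = (PySem.List.pyGetD grid 0 []).length) ∧
  -(grid.length : Int) ≤ start_r ∧ start_r < grid.length ∧
  -((PySem.List.pyGetD grid 0 []).length : Int) ≤ start_c ∧
  start_c < (PySem.List.pyGetD grid 0 []).length
instance (grid : List (List Int)) (start_r : Int) (start_c : Int) :
    Decidable (Pre_trailhead_score grid start_r start_c) := by
  unfold Pre_trailhead_score; infer_instance

def pvWitness_trailhead_score : List (List Int) × Int × Int := ([[8, 9], [9, 0]], 0, 0)

def Spec_trailhead_score (grid : List (List Int)) (start_r : Int) (start_c : Int) (out : Int) : Prop := out = trailhead_score_alt grid start_r start_c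
instance (grid : List (List Int)) (start_r : Int) (start_c : Int) (out : Int) : Decidable (Spec_trailhead_score grid start_r start_c out) := by unfold Spec_trailhead_score; infer_instance

-- ===== CLAIM (what is proved, stated in full; the proofs are below) =====
def Claim_equal_trailhead_score : Prop := ∀ (grid : List (List Int)) (start_r : Int) (start_c : Int), Dom_trailhead_score grid start_r start_c → Pre_trailhead_score grid start_r start_c → Spec_trailhead_score grid start_r start_c (trailhead_score grid start_r start_c)

-- ===== LEMMAS AND PROOFS =====

def pvInBox (rlo rows clo cols : Int) (x : Int × Int) : Prop :=
  rlo ≤ x.1 ∧ x.1 < rows ∧ clo ≤ x.2 ∧ x.2 < cols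

theorem pvNeighbors_inBox {rlo rows clo cols : Int} {x y : Int × Int}
    (hrlo : rlo ≤ 0) (hclo : clo ≤ 0)
    (hx : pvInBox rlo rows clo cols x) (hy : y ∈ pvNeighbors x.1 x.2 rows cols) :
    pvInBox rlo rows clo cols y := by
  obtain ⟨h1, h2, h3, h4⟩ := hx
  unfold pvNeighbors at hy
  simp only [List.mem_append] at hy
  unfold pvInBox
  rcases hy with ((h | h) | h) | h <;> split at h <;>
    simp_all <;> omega

-- nodup list of in-box cells has at most (rows-rlo)*(cols-clo) elements
theorem pvCard_le {rlo rows clo cols : Int} {l : List (Int × Int)}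
    (hnd : l.Nodup) (hbox : ∀ x ∈ l, pvInBox rlo rows clo cols x) :
    l.length ≤ (rows - rlo).toNat * (cols - clo).toNat := by
  have hsub : l.toFinset ⊆ Finset.Ico rlo rows ×ˢ Finset.Ico clo cols := by
    intro x hx
    simp only [List.mem_toFinset] at hx
    obtain ⟨a, b, c, d⟩ := hbox x hx
    simp only [Finset.mem_product, Finset.mem_Ico]
    omega
  have hle := Finset.card_le_card hsub
  rw [List.toFinset_card_of_nodup hnd] at hle
  simpa [Finset.card_product, Int.card_Ico] using hle

-- A's inner neighbour fold, coupled with B's inner neighbour fold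
theorem pvInner (grid : List (List Int)) (nh : Int) (L : List (Int × Int)) :
    ∀ (q visited acc : List (Int × Int)),
      (∀ y, pvAt grid y.1 y.2 = nh → (y ∈ visited ↔ y ∈ acc)) →
      visited.Nodup →
      ∃ d : List (Int × Int),
        L.foldl (fun (p : List (Int × Int) × PySem.Set (Int × Int)) y =>
            if y ∉ p.2 ∧ pvAt grid y.1 y.2 = nh then (p.1 ++ [y], p.2 ++ [y]) else p)
          (q, visited) = (q ++ d, visited ++ d) ∧
        L.foldl (fun nxt y => if pvAt grid y.1 y.2 = nh then PySem.Set.add nxt y else nxt) acc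
          = acc ++ d ∧
        (∀ y ∈ d, pvAt grid y.1 y.2 = nh ∧ y ∈ L) ∧
        (∀ y, pvAt grid y.1 y.2 = nh → (y ∈ visited ++ d ↔ y ∈ acc ++ d)) ∧
        (visited ++ d).Nodup := by
  induction L with
  | nil =>
    intro q visited acc H hnd
    exact ⟨[], by simp, by simp, by simp, by simpa using H, by simpa using hnd⟩
  | cons y L ih =>
    intro q visited acc H hnd
    simp only [List.foldl_cons]
    by_cases hv : pvAt grid y.1 y.2 = nh
    · by_cases hmem : y ∈ acc
      · have hvis : y ∈ visited := (H y hv).mpr hmem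
        have eA : (if y ∉ (q, visited).2 ∧ pvAt grid y.1 y.2 = nh
            then ((q, visited).1 ++ [y], (q, visited).2 ++ [y]) else (q, visited)) = (q, visited) := by
          simp [hvis]
        have eB : PySem.Set.add acc y = acc := by
          simp [PySem.Set.add, PySem.Set.contains, hmem]
        rw [eA, if_pos hv, eB]
        obtain ⟨d, hA, hB, hd, H2, hnd2⟩ := ih q visited acc H hnd
        exact ⟨d, hA, hB, fun z hz => ⟨(hd z hz).1, List.mem_cons_of_mem _ (hd z hz).2⟩, H2, hnd2⟩
      · have hvis : y ∉ visited := fun hy => hmem ((H y hv).mp hy)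
        have eA : (if y ∉ (q, visited).2 ∧ pvAt grid y.1 y.2 = nh
            then ((q, visited).1 ++ [y], (q, visited).2 ++ [y]) else (q, visited))
            = (q ++ [y], visited ++ [y]) := by
          simp [hvis, hv]
        have eB : PySem.Set.add acc y = acc ++ [y] := by
          simp [PySem.Set.add, PySem.Set.contains, hmem]
        rw [eA, if_pos hv, eB]
        have H2 : ∀ z, pvAt grid z.1 z.2 = nh → (z ∈ visited ++ [y] ↔ z ∈ acc ++ [y]) := by
          intro z hz
          simp only [List.mem_append, List.mem_singleton, H z hz]
        have hnd2 : (visited ++ [y]).Nodup := by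
          refine List.Nodup.append hnd (List.nodup_singleton y) ?_
          intro a ha hay
          simp only [List.mem_singleton] at hay
          exact hvis (hay ▸ ha)
        obtain ⟨d, hA, hB, hd, H3, hnd3⟩ := ih (q ++ [y]) (visited ++ [y]) (acc ++ [y]) H2 hnd2
        refine ⟨y :: d, ?_, ?_, ?_, ?_, ?_⟩
        · rw [hA]; simp
        · rw [hB]; simp
        · intro z hz
          rcases List.mem_cons.mp hz with rfl | hz
          · exact ⟨hv, by simp⟩
          · exact ⟨(hd z hz).1, List.mem_cons_of_mem _ (hd z hz).2⟩
        · intro z hz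
          have := H3 z hz
          simpa [List.append_assoc] using this
        · simpa [List.append_assoc] using hnd3
    · have eA : (if y ∉ (q, visited).2 ∧ pvAt grid y.1 y.2 = nh
          then ((q, visited).1 ++ [y], (q, visited).2 ++ [y]) else (q, visited)) = (q, visited) := by
        simp [hv]
      rw [eA, if_neg hv]
      obtain ⟨d, hA, hB, hd, H2, hnd2⟩ := ih q visited acc H hnd
      exact ⟨d, hA, hB, fun z hz => ⟨(hd z hz).1, List.mem_cons_of_mem _ (hd z hz).2⟩, H2, hnd2⟩

-- processing one whole level of A's queue (height h ≠ 9)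
theorem pvLevel (grid : List (List Int)) (rlo rows clo cols : Int)
    (hrlo : rlo ≤ 0) (hclo : clo ≤ 0) (h : Int) (h9 : h ≠ 9) :
    ∀ (cs : List (Int × Int)) (fuel : Nat) (ns visited found9 : List (Int × Int)),
      (∀ x ∈ cs, pvAt grid x.1 x.2 = h) →
      (∀ x ∈ cs, pvInBox rlo rows clo cols x) →
      (∀ y ∈ ns, pvAt grid y.1 y.2 = h + 1) →
      (∀ y, pvAt grid y.1 y.2 = h + 1 → (y ∈ visited ↔ y ∈ ns)) →
      visited.Nodup →
      (∀ x ∈ visited, pvInBox rlo rows clo cols x) →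
      fuel + visited.length ≥ (rows - rlo).toNat * (cols - clo).toNat + 1 + (cs ++ ns).length →
      ∃ d : List (Int × Int),
        cs.foldl (fun nxt rc =>
            (pvNeighbors rc.1 rc.2 rows cols).foldl
              (fun nxt y => if pvAt grid y.1 y.2 = h + 1 then PySem.Set.add nxt y else nxt) nxt)
          ns = ns ++ d ∧
        pvBfs grid rows cols fuel (cs ++ ns) visited found9
          = pvBfs grid rows cols (fuel - cs.length) (ns ++ d) (visited ++ d) found9 ∧
        (∀ y ∈ ns ++ d, pvAt grid y.1 y.2 = h + 1) ∧
        (∀ y, pvAt grid y.1 y.2 = h + 1 → (y ∈ visited ++ d ↔ y ∈ ns ++ d)) ∧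
        (visited ++ d).Nodup ∧
        (∀ x ∈ visited ++ d, pvInBox rlo rows clo cols x) ∧
        fuel - cs.length + (visited ++ d).length ≥ (rows - rlo).toNat * (cols - clo).toNat + 1 + (ns ++ d).length := by
  intro cs
  induction cs with
  | nil =>
    intro fuel ns visited found9 _ _ hns H hnd hboxv hfuel
    exact ⟨[], by simp, by simp, by simpa using hns, by simpa using H,
      by simpa using hnd, by simpa using hboxv, by simpa using hfuel⟩
  | cons x cs ih =>
    intro fuel ns visited found9 hvals hboxc hns H hnd hboxv hfuel
    have hvlen : visited.length ≤ (rows - rlo).toNat * (cols - clo).toNat := pvCard_le hnd hboxv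
    obtain ⟨f, rfl⟩ : ∃ f, fuel = f + 1 := by
      cases fuel with
      | zero => exfalso; simp at hfuel; omega
      | succ f => exact ⟨f, rfl⟩
    have hx : pvAt grid x.1 x.2 = h := hvals x (by simp)
    obtain ⟨d1, hA, hB, hd1, H2, hnd2⟩ :=
      pvInner grid (h + 1) (pvNeighbors x.1 x.2 rows cols) (cs ++ ns) visited ns H hnd
    have hstep : pvBfs grid rows cols (f + 1) ((x :: cs) ++ ns) visited found9
        = pvBfs grid rows cols f (cs ++ (ns ++ d1)) (visited ++ d1) found9 := by
      simp only [List.cons_append, pvBfs, hx]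
      rw [if_neg h9]
      rw [hA]
      simp [List.append_assoc]
    have hboxv2 : ∀ z ∈ visited ++ d1, pvInBox rlo rows clo cols z := by
      intro z hz
      rcases List.mem_append.mp hz with hz | hz
      · exact hboxv z hz
      · exact pvNeighbors_inBox hrlo hclo (hboxc x (by simp)) (hd1 z hz).2
    have hns2 : ∀ y ∈ ns ++ d1, pvAt grid y.1 y.2 = h + 1 := by
      intro z hz
      rcases List.mem_append.mp hz with hz | hz
      · exact hns z hz
      · exact (hd1 z hz).1
    obtain ⟨d2, hB2, hEq2, hns3, H3, hnd3, hbox3, hfuel3⟩ :=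
      ih f (ns ++ d1) (visited ++ d1) found9 (fun z hz => hvals z (by simp [hz]))
        (fun z hz => hboxc z (by simp [hz])) hns2 H2 hnd2 hboxv2
        (by simp only [List.length_append, List.length_cons] at hfuel ⊢; omega)
    refine ⟨d1 ++ d2, ?_, ?_, ?_, ?_, ?_, ?_, ?_⟩
    · simp only [List.foldl_cons, hB, hB2]
      simp [List.append_assoc]
    · rw [hstep, hEq2]
      have hlen : f - cs.length = f + 1 - (x :: cs).length := by simp
      rw [hlen]
      simp [List.append_assoc]
    · simpa [List.append_assoc] using hns3
    · simpa [List.append_assoc] using H3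
    · simpa [List.append_assoc] using hnd3
    · simpa [List.append_assoc] using hbox3
    · simp only [List.length_append, List.length_cons] at hfuel3 ⊢
      omega

-- draining a level whose cells all have height 9
theorem pvDrain9 (grid : List (List Int)) (rows cols : Int) :
    ∀ (cs : List (Int × Int)) (fuel : Nat) (visited found9 : List (Int × Int)),
      (∀ x ∈ cs, pvAt grid x.1 x.2 = 9) → cs.Nodup → (∀ x ∈ cs, x ∉ found9) →
      fuel > cs.length →
      pvBfs grid rows cols fuel cs visited found9 = ((found9.length + cs.length : Nat) : Int) := by
  intro cs
  induction cs with
  | nil =>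
    intro fuel visited found9 _ _ _ hfuel
    obtain ⟨f, rfl⟩ : ∃ f, fuel = f + 1 := ⟨fuel - 1, by omega⟩
    simp [pvBfs]
  | cons x cs ih =>
    intro fuel visited found9 hvals hnd hnew hfuel
    obtain ⟨f, rfl⟩ : ∃ f, fuel = f + 1 := ⟨fuel - 1, by omega⟩
    have hx : pvAt grid x.1 x.2 = 9 := hvals x (by simp)
    have hadd : PySem.Set.add found9 x = found9 ++ [x] := by
      simp [PySem.Set.add, PySem.Set.contains, hnew x (by simp)]
    simp only [pvBfs, hx, hadd]
    rw [if_pos trivial]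
    rw [ih f visited (found9 ++ [x]) (fun z hz => hvals z (by simp [hz]))
      (List.Nodup.of_cons hnd)
      (fun z hz => by
        simp only [List.mem_append, List.mem_singleton]
        rintro (hzf | rfl)
        · exact hnew z (by simp [hz]) hzf
        · exact (List.nodup_cons.mp hnd).1 hz)
      (by simp at hfuel; omega)]
    simp only [List.length_append, List.length_cons, List.length_nil]
    omega

-- A's inner fold only ever appends cells of height nh to queue and visited
theorem pvInnerShape (grid : List (List Int)) (nh : Int) (L : List (Int × Int)) :
    ∀ (q visited : List (Int × Int)),
      ∃ d : List (Int × Int),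
        L.foldl (fun (p : List (Int × Int) × PySem.Set (Int × Int)) y =>
            if y ∉ p.2 ∧ pvAt grid y.1 y.2 = nh then (p.1 ++ [y], p.2 ++ [y]) else p)
          (q, visited) = (q ++ d, visited ++ d) ∧
        (∀ y ∈ d, pvAt grid y.1 y.2 = nh) := by
  induction L with
  | nil => intro q visited; exact ⟨[], by simp, by simp⟩
  | cons y L ih =>
    intro q visited
    simp only [List.foldl_cons]
    by_cases hc : y ∉ visited ∧ pvAt grid y.1 y.2 = nh
    · have eA : (if y ∉ (q, visited).2 ∧ pvAt grid y.1 y.2 = nh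
          then ((q, visited).1 ++ [y], (q, visited).2 ++ [y]) else (q, visited))
          = (q ++ [y], visited ++ [y]) := by simp [hc.1, hc.2]
      rw [eA]
      obtain ⟨d, hA, hd⟩ := ih (q ++ [y]) (visited ++ [y])
      refine ⟨y :: d, ?_, ?_⟩
      · rw [hA]; simp
      · intro z hz
        rcases List.mem_cons.mp hz with rfl | hz
        · exact hc.2
        · exact hd z hz
    · have eA : (if y ∉ (q, visited).2 ∧ pvAt grid y.1 y.2 = nh
          then ((q, visited).1 ++ [y], (q, visited).2 ++ [y]) else (q, visited)) = (q, visited) := by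
        simp only [ite_eq_right_iff]
        intro hc2; exact absurd hc2 hc
      rw [eA]
      exact ih q visited

-- when every queued cell is higher than 9, found9 never grows
theorem pvNo9 (grid : List (List Int)) (rows cols : Int) :
    ∀ (fuel : Nat) (q visited found9 : List (Int × Int)),
      (∀ x ∈ q, pvAt grid x.1 x.2 > 9) →
      pvBfs grid rows cols fuel q visited found9 = (found9.length : Int) := by
  intro fuel
  induction fuel with
  | zero => intro q visited found9 _; simp [pvBfs]
  | succ f ih =>
    intro q visited found9 hq
    cases q with
    | nil => simp [pvBfs]
    | cons x q =>
      have hx : pvAt grid x.1 x.2 > 9 := hq x (by simp)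
      obtain ⟨d, hA, hd⟩ := pvInnerShape grid (pvAt grid x.1 x.2 + 1) (pvNeighbors x.1 x.2 rows cols) q visited
      simp only [pvBfs]
      rw [if_neg (by omega), hA]
      exact ih (q ++ d) (visited ++ d) found9 (fun z hz => by
        rcases List.mem_append.mp hz with hz | hz
        · exact hq z (by simp [hz])
        · have := hd z hz; omega)

-- the run from a level of height ≥ 9: A drains (h = 9) or wanders fruitlessly (h > 9), B stops
theorem pvRunHigh (grid : List (List Int)) (rlo rows clo cols : Int) (h : Int)
    (cur visited : List (Int × Int)) (fuel : Nat) (h9 : 9 ≤ h)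
    (hvals : ∀ x ∈ cur, pvAt grid x.1 x.2 = h)
    (hsuf : ∃ v0, visited = v0 ++ cur)
    (hnd : visited.Nodup)
    (hbox : ∀ x ∈ visited, pvInBox rlo rows clo cols x)
    (hfuel : fuel + visited.length ≥ (rows - rlo).toNat * (cols - clo).toNat + 1 + cur.length) :
    pvBfs grid rows cols fuel cur visited []
      = (if (pvSweep grid rows cols h cur).2 = 9
          then ((pvSweep grid rows cols h cur).1.length : Int) else 0) := by
  have hvlen : visited.length ≤ (rows - rlo).toNat * (cols - clo).toNat := pvCard_le hnd hbox
  have hsw : pvSweep grid rows cols h cur = (cur, h) := by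
    rw [pvSweep]
    simp only [ite_eq_right_iff]
    intro hc; exfalso; omega
  rw [hsw]
  rcases eq_or_lt_of_le h9 with rfl | hgt
  · -- h = 9: drain the last level
    have hcnd : cur.Nodup := by
      obtain ⟨v0, rfl⟩ := hsuf
      exact hnd.of_append_right
    rw [pvDrain9 grid rows cols cur fuel visited [] hvals hcnd (by simp) (by omega)]
    simp
  · -- h > 9: no height-9 cell is ever popped
    rw [pvNo9 grid rows cols fuel cur visited [] (fun x hx => by rw [hvals x hx]; omega)]
    simp only [if_neg (by omega : ¬ h = 9)]
    simp

-- the full run: A's BFS from a level equals B's sweep from that level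
theorem pvRun (grid : List (List Int)) (rlo rows clo cols : Int)
    (hrlo : rlo ≤ 0) (hclo : clo ≤ 0) :
    ∀ (n : Nat) (h : Int) (cur visited : List (Int × Int)) (fuel : Nat),
      n = (9 - h).toNat →
      (∀ x ∈ cur, pvAt grid x.1 x.2 = h) →
      (∃ v0, visited = v0 ++ cur) →
      (∀ x ∈ visited, pvAt grid x.1 x.2 ≤ h) →
      visited.Nodup →
      (∀ x ∈ visited, pvInBox rlo rows clo cols x) →
      fuel + visited.length ≥ (rows - rlo).toNat * (cols - clo).toNat + 1 + cur.length →
      pvBfs grid rows cols fuel cur visited []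
        = (if (pvSweep grid rows cols h cur).2 = 9
            then ((pvSweep grid rows cols h cur).1.length : Int) else 0) := by
  intro n
  induction n with
  | zero =>
    intro h cur visited fuel hn hvals hsuf hle hnd hbox hfuel
    exact pvRunHigh grid rlo rows clo cols h cur visited fuel (by omega) hvals hsuf hnd hbox hfuel
  | succ m ih =>
    intro h cur visited fuel hn hvals hsuf hle hnd hbox hfuel
    by_cases hlt : h < 9
    · rcases eq_or_ne cur [] with rfl | hcur
      · have hvlen : visited.length ≤ (rows - rlo).toNat * (cols - clo).toNat := pvCard_le hnd hbox
        obtain ⟨f, rfl⟩ : ∃ f, fuel = f + 1 := ⟨fuel - 1, by simp at hfuel; omega⟩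
        rw [pvSweep]
        simp [pvBfs]
      · obtain ⟨d, hBfold, hEq, hns3, H3, hnd3, hbox3, hfuel3⟩ :=
          pvLevel grid rlo rows clo cols hrlo hclo h (by omega) cur fuel [] visited [] hvals
            (fun x hx => hbox x (by obtain ⟨v0, rfl⟩ := hsuf; simp [hx]))
            (by simp)
            (fun y hy => by
              constructor
              · intro hyv; exact absurd (hle y hyv) (by omega)
              · intro hyn; exact absurd hyn (by simp))
            hnd hbox (by simpa using hfuel)
        simp only [List.append_nil, List.nil_append] at hEq hns3 H3 hnd3 hbox3 hfuel3 hBfold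
        rw [hEq]
        have hstep : pvSweep grid rows cols h cur
            = pvSweep grid rows cols (h + 1) d := by
          rw [pvSweep, if_pos ⟨hlt, hcur⟩]
          have : pvLevelStep grid rows cols (h + 1) cur = d := by
            unfold pvLevelStep
            rw [hBfold]
          rw [this]
        rw [hstep]
        exact ih (h + 1) d (visited ++ d) (fuel - cur.length) (by omega) hns3
          ⟨visited, rfl⟩
          (fun x hx => by
            rcases List.mem_append.mp hx with hx | hx
            · exact le_trans (hle x hx) (by omega)
            · exact le_of_eq (hns3 x hx))
          hnd3 hbox3 hfuel3
    · exact pvRunHigh grid rlo rows clo cols h cur visited fuel (by omega) hvals hsuf hnd hbox hfuel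

-- ===== VERDICT (by name: the statement is the Claim_ definition above) =====
theorem trailhead_score_spec : Claim_equal_trailhead_score := by
  intro grid sr sc _ hpre
  obtain ⟨hne, hrect, hr0, hr1, hc0, hc1⟩ := hpre
  unfold Spec_trailhead_score trailhead_score trailhead_score_alt
  simp only [PySem.List.len_eq]
  rw [pvRun grid (min sr 0) (grid.length : Int) (min sc 0)
      ((PySem.List.pyGetD grid 0 []).length : Int) (min_le_right _ _) (min_le_right _ _)
      (9 - pvAt grid sr sc).toNat (pvAt grid sr sc) [(sr, sc)] [(sr, sc)]
      ((grid.length + sr.natAbs) * ((PySem.List.pyGetD grid 0 []).length + sc.natAbs) + 1) rfl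
      (by intro x hx; simp only [List.mem_singleton] at hx; subst hx; rfl)
      ⟨[], rfl⟩
      (by intro x hx; simp only [List.mem_singleton] at hx; subst hx; exact le_refl _)
      (List.nodup_singleton _)
      (by intro x hx; simp only [List.mem_singleton] at hx; subst hx
          exact ⟨min_le_left _ _, hr1, min_le_left _ _, hc1⟩)
      (by
        have h1 : ((grid.length : Int) - min sr 0).toNat ≤ grid.length + sr.natAbs := by omega
        have h2 : (((PySem.List.pyGetD grid 0 []).length : Int) - min sc 0).toNat
            ≤ (PySem.List.pyGetD grid 0 []).length + sc.natAbs := by omega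
        have h3 := Nat.mul_le_mul h1 h2
        simp only [List.length_cons, List.length_nil]
        omega)]
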